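-- pv_equiv track=rewrite | github.com/w-kibor/Data-Structures-and-Algorithms | Logic Building Problems/Easy Problems/pair_cube_count.py | pair_cube_count
-- ===== SOURCE A (Python) =====
-- def integer_cuberoot(n: int) -> int:
--     if n < 0:
--         return -integer_cuberoot(-n)
--     x = int(round(n ** (1 / 3)))
--     while (x + 1) ** 3 <= n:
--         x += 1
--     while x ** 3 > n:
--         x -= 1
--     return x
--
-- def pair_cube_count(n: int) -> int:
--     if n < 0:
--         return 0
--     count = 0
--     limit = integer_cuberoot(n)
--     for a in range(0, limit + 1):
--         a3 = a ** 3
--         b3 = n - a3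
--         b = integer_cuberoot(b3)
--         if b >= a and b ** 3 == b3:
--             count += 1
--     return count
-- ===== SOURCE B (Python) =====
-- def integer_cuberoot(n: int) -> int:
--     # binary search for the largest x with x**3 <= n (n >= 0)
--     lo, hi = 0, n
--     while lo < hi:
--         mid = (lo + hi + 1) // 2
--         if mid ** 3 <= n:
--             lo = mid
--         else:
--             hi = mid - 1
--     return lo
--
-- def pair_cube_count(n: int) -> int:
--     if n < 0:
--         return 0
--     count = 0
--     lo, hi = 0, integer_cuberoot(n)
--     while lo <= hi:
--         s = lo ** 3 + hi ** 3
--         if s == n: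
--             count += 1
--             lo += 1
--             hi -= 1
--         elif s < n:
--             lo += 1
--         else:
--             hi -= 1
--     return count
-- ===== Notes on version B (the rewrite author's own statement) =====
-- stated objective: alternative
-- what changed: Replaces A's enumerate-every-a-and-test-perfect-cube scan (one integer_cuberoot call per candidate a) by a two-pointer sweep over [0, cuberoot(n)] that converges lo and hi with one O(1) step per iteration, with a single binary-search cube root for the initial bound.
import Mathlib
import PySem

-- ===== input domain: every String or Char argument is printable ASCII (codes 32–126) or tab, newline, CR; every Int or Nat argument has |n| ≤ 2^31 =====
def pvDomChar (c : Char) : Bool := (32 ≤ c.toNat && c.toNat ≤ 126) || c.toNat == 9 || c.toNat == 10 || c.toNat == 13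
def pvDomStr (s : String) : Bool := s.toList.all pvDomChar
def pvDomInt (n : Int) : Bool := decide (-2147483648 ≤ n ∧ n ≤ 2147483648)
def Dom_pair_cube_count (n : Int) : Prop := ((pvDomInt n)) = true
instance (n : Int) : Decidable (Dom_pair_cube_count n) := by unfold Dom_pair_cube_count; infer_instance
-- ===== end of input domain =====

-- B replaces A's scan over every a in [0, cbrt n] with a cuberoot test per step
-- by a two-pointer sweep (lo from 0, hi from cbrt n); return value only, no side effects.

-- cube strict monotonicity, cited by the ports' termination proofs
theorem pv_cube_lt_cube {a b : Int} (h : a < b) : a ^ 3 < b ^ 3 := by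
  nlinarith [sq_nonneg (a + b), sq_nonneg a, sq_nonneg b, sq_nonneg (a - b)]

-- ===== PORT A =====
-- Python seeds x with int(round(n ** (1/3))) (a float PySem cannot express) and then
-- corrects with the two while loops; the loops converge to the same value from ANY seed,
-- so we port with seed 0 — exact for the returned value, only the iteration count differs.
def pvIcrUp (n x : Int) : Int :=
  if (x + 1) ^ 3 ≤ n then pvIcrUp n (x + 1) else x
termination_by (n - x ^ 3).toNat
decreasing_by
  have := pv_cube_lt_cube (show x < x + 1 by omega)
  omega

def pvIcrDown (n x : Int) : Int :=
  if n < x ^ 3 then pvIcrDown n (x - 1) else x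
termination_by (x ^ 3 - n).toNat
decreasing_by
  have := pv_cube_lt_cube (show x - 1 < x by omega)
  omega

def integer_cuberoot (n : Int) : Int :=
  if n < 0 then -(pvIcrDown (-n) (pvIcrUp (-n) 0))
  else pvIcrDown n (pvIcrUp n 0)

def pair_cube_count (n : Int) : Int :=
  if n < 0 then 0
  else
    let limit := integer_cuberoot n
    (PySem.List.pyRange 0 (limit + 1) 1).foldl
      (fun count a =>
        let a3 := a ^ 3
        let b3 := n - a3
        let b := integer_cuberoot b3
        if a ≤ b ∧ b ^ 3 = b3 then count + 1 else count) 0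

-- ===== PORT B =====
-- binary search for the largest x with x^3 ≤ n (called with n ≥ 0 only)
def pvCbrtBS (n lo hi : Int) : Int :=
  if lo < hi then
    let mid := PySem.Int.floordiv (lo + hi + 1) 2
    if mid ^ 3 ≤ n then pvCbrtBS n mid hi else pvCbrtBS n lo (mid - 1)
  else lo
termination_by (hi - lo).toNat
decreasing_by
  all_goals
    rw [PySem.Int.floordiv_eq_ediv_of_pos (by omega)] at *
    omega

def integer_cuberoot_alt (n : Int) : Int := pvCbrtBS n 0 n

def pvTP (n lo hi count : Int) : Int :=
  if lo ≤ hi then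
    let s := lo ^ 3 + hi ^ 3
    if s = n then pvTP n (lo + 1) (hi - 1) (count + 1)
    else if s < n then pvTP n (lo + 1) hi count
    else pvTP n lo (hi - 1) count
  else count
termination_by (hi + 1 - lo).toNat
decreasing_by all_goals omega

def pair_cube_count_alt (n : Int) : Int :=
  if n < 0 then 0 else pvTP n 0 (integer_cuberoot_alt n) 0

-- ===== PRECONDITION & SPEC =====
def Spec_pair_cube_count (n : Int) (out : Int) : Prop := out = pair_cube_count_alt n
instance (n : Int) (out : Int) : Decidable (Spec_pair_cube_count n out) := by unfold Spec_pair_cube_count; infer_instance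

-- ===== CLAIM (what is proved, stated in full; the proofs are below) =====
def Claim_equal_pair_cube_count : Prop := ∀ (n : Int), Dom_pair_cube_count n → Spec_pair_cube_count n (pair_cube_count n)

-- ===== LEMMAS AND PROOFS =====

theorem pv_cube_le_cube {a b : Int} (h : a ≤ b) : a ^ 3 ≤ b ^ 3 := by
  rcases lt_or_eq_of_le h with h | h
  · exact le_of_lt (pv_cube_lt_cube h)
  · subst h; exact le_rfl

theorem pv_cube_lt_iff {a b : Int} : a ^ 3 < b ^ 3 ↔ a < b := by
  constructor
  · intro h
    by_contra hc
    exact absurd (pv_cube_le_cube (by omega : b ≤ a)) (by omega)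
  · exact pv_cube_lt_cube

theorem pv_cube_inj {a b : Int} (h : a ^ 3 = b ^ 3) : a = b := by
  rcases lt_trichotomy a b with hc | hc | hc
  · exact absurd (pv_cube_lt_cube hc) (by omega)
  · exact hc
  · exact absurd (pv_cube_lt_cube hc) (by omega)

-- the cube-root specification
def pvIsRoot (n r : Int) : Prop := r ^ 3 ≤ n ∧ n < (r + 1) ^ 3

theorem pvIsRoot_unique {n r s : Int} (h1 : pvIsRoot n r) (h2 : pvIsRoot n s) : r = s := by
  obtain ⟨h1a, h1b⟩ := h1; obtain ⟨h2a, h2b⟩ := h2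
  by_contra hne
  rcases lt_or_gt_of_ne hne with h | h
  · exact absurd (pv_cube_le_cube (by omega : r + 1 ≤ s)) (by omega)
  · exact absurd (pv_cube_le_cube (by omega : s + 1 ≤ r)) (by omega)

theorem pvIcrUp_spec (n : Int) : ∀ x : Int, x ^ 3 ≤ n → pvIsRoot n (pvIcrUp n x) := by
  intro x
  fun_induction pvIcrUp n x with
  | case1 x h ih =>
    intro _
    exact ih h
  | case2 x h =>
    intro hx
    exact ⟨hx, by omega⟩

theorem pvIcrDown_id (n x : Int) (h : ¬ n < x ^ 3) : pvIcrDown n x = x := by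
  rw [pvIcrDown]; simp [h]

theorem integer_cuberoot_spec (n : Int) (h : 0 ≤ n) : pvIsRoot n (integer_cuberoot n) := by
  have hu := pvIcrUp_spec n 0 (by norm_num; omega)
  unfold integer_cuberoot
  rw [if_neg (by omega), pvIcrDown_id n _ (by have h1 := hu.1; omega)]
  exact hu

theorem pvCbrtBS_spec (n : Int) : ∀ lo hi : Int, lo ≤ hi → lo ^ 3 ≤ n → n < (hi + 1) ^ 3 →
    pvIsRoot n (pvCbrtBS n lo hi) := by
  intro lo hi
  fun_induction pvCbrtBS n lo hi with
  | case1 lo hi hlt mid hmid ih =>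
    intro _ _ hhi
    have hb : lo < mid ∧ mid ≤ hi := by
      rw [show mid = PySem.Int.floordiv (lo + hi + 1) 2 from rfl,
        PySem.Int.floordiv_eq_ediv_of_pos (by omega)]
      omega
    exact ih hb.2 hmid hhi
  | case2 lo hi hlt mid hmid ih =>
    intro _ hlo _
    have hb : lo < mid ∧ mid ≤ hi := by
      rw [show mid = PySem.Int.floordiv (lo + hi + 1) 2 from rfl,
        PySem.Int.floordiv_eq_ediv_of_pos (by omega)]
      omega
    refine ih (by omega) hlo ?_
    have h2 : n < mid ^ 3 := by omega
    simpa using h2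
  | case3 lo hi hlt =>
    intro hle hlo hhi
    have heq : lo = hi := by omega
    subst heq
    exact ⟨hlo, hhi⟩

theorem integer_cuberoot_alt_spec (n : Int) (h : 0 ≤ n) : pvIsRoot n (integer_cuberoot_alt n) := by
  unfold integer_cuberoot_alt
  refine pvCbrtBS_spec n 0 n h (by norm_num; omega) ?_
  nlinarith [sq_nonneg n, sq_nonneg (n + 1)]

theorem roots_agree (n : Int) (h : 0 ≤ n) : integer_cuberoot_alt n = integer_cuberoot n :=
  pvIsRoot_unique (integer_cuberoot_alt_spec n h) (integer_cuberoot_spec n h)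

-- the number of pairs lo ≤ a ≤ b ≤ hi with a³ + b³ = n
noncomputable def pvS (n lo hi : Int) : ℕ :=
  ((Finset.Icc lo hi ×ˢ Finset.Icc lo hi).filter
    (fun p => p.1 ≤ p.2 ∧ p.1 ^ 3 + p.2 ^ 3 = n)).card

theorem pvS_empty (n lo hi : Int) (h : hi < lo) : pvS n lo hi = 0 := by
  unfold pvS
  rw [Finset.Icc_eq_empty (by omega)]
  simp

theorem pvS_split (n lo hi : Int) (hle : lo ≤ hi) (hs : lo ^ 3 + hi ^ 3 = n) :
    pvS n lo hi = 1 + pvS n (lo + 1) (hi - 1) := by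
  unfold pvS
  have hset : (Finset.Icc lo hi ×ˢ Finset.Icc lo hi).filter
      (fun p => p.1 ≤ p.2 ∧ p.1 ^ 3 + p.2 ^ 3 = n)
      = insert (lo, hi) ((Finset.Icc (lo + 1) (hi - 1) ×ˢ Finset.Icc (lo + 1) (hi - 1)).filter
        (fun p => p.1 ≤ p.2 ∧ p.1 ^ 3 + p.2 ^ 3 = n)) := by
    ext ⟨a, b⟩
    simp only [Finset.mem_filter, Finset.mem_product, Finset.mem_Icc, Finset.mem_insert,
      Prod.mk.injEq]
    constructor
    · rintro ⟨⟨⟨h1, h2⟩, h3, h4⟩, h5, h6⟩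
      by_cases hab : a = lo
      · subst hab
        exact Or.inl ⟨rfl, pv_cube_inj (show b ^ 3 = hi ^ 3 by omega)⟩
      · have hbhi : b ≠ hi := by
          intro hb; subst hb
          exact hab (pv_cube_inj (show a ^ 3 = lo ^ 3 by omega))
        exact Or.inr ⟨⟨⟨by omega, by omega⟩, by omega, by omega⟩, h5, h6⟩
    · rintro (⟨rfl, rfl⟩ | ⟨⟨⟨h1, h2⟩, h3, h4⟩, h5, h6⟩)
      · exact ⟨⟨⟨le_rfl, hle⟩, hle, le_rfl⟩, hle, hs⟩
      · exact ⟨⟨⟨by omega, by omega⟩, by omega, by omega⟩, h5, h6⟩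
  rw [hset, Finset.card_insert_of_notMem]
  · omega
  · simp only [Finset.mem_filter, Finset.mem_product, Finset.mem_Icc]
    intro h
    omega

theorem pvS_lt (n lo hi : Int) (hs : lo ^ 3 + hi ^ 3 < n) :
    pvS n lo hi = pvS n (lo + 1) hi := by
  unfold pvS
  congr 1
  ext ⟨a, b⟩
  simp only [Finset.mem_filter, Finset.mem_product, Finset.mem_Icc]
  constructor
  · rintro ⟨⟨⟨h1, h2⟩, h3, h4⟩, h5, h6⟩
    have hane : a ≠ lo := by
      intro h; subst h
      have hb3 := pv_cube_le_cube h4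
      omega
    exact ⟨⟨⟨by omega, h2⟩, by omega, h4⟩, h5, h6⟩
  · rintro ⟨⟨⟨h1, h2⟩, h3, h4⟩, h5, h6⟩
    exact ⟨⟨⟨by omega, h2⟩, by omega, h4⟩, h5, h6⟩

theorem pvS_gt (n lo hi : Int) (hs : n < lo ^ 3 + hi ^ 3) :
    pvS n lo hi = pvS n lo (hi - 1) := by
  unfold pvS
  congr 1
  ext ⟨a, b⟩
  simp only [Finset.mem_filter, Finset.mem_product, Finset.mem_Icc]
  constructor
  · rintro ⟨⟨⟨h1, h2⟩, h3, h4⟩, h5, h6⟩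
    have hbne : b ≠ hi := by
      intro h; subst h
      have ha3 := pv_cube_le_cube h1
      omega
    exact ⟨⟨⟨h1, by omega⟩, h3, by omega⟩, h5, h6⟩
  · rintro ⟨⟨⟨h1, h2⟩, h3, h4⟩, h5, h6⟩
    exact ⟨⟨⟨h1, by omega⟩, h3, by omega⟩, h5, h6⟩

theorem pvTP_eq (n : Int) : ∀ lo hi count : Int, pvTP n lo hi count = count + pvS n lo hi := by
  intro lo hi count
  fun_induction pvTP n lo hi count with
  | case1 lo hi count hle s hs ih =>
    rw [ih, pvS_split n lo hi hle (by omega)]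
    push_cast
    ring
  | case2 lo hi count hle s hs1 hs2 ih =>
    rw [ih, pvS_lt n lo hi (by omega)]
  | case3 lo hi count hle s hs1 hs2 ih =>
    rw [ih, pvS_gt n lo hi (by omega)]
  | case4 lo hi count hle =>
    rw [pvS_empty n lo hi (by omega)]
    simp

-- A's per-element test holds iff there is a matching b
theorem pvA_test (n a r : Int) (ha : 0 ≤ a) (har : a ≤ r) (hr : pvIsRoot n r) :
    ((a ≤ integer_cuberoot (n - a ^ 3) ∧ (integer_cuberoot (n - a ^ 3)) ^ 3 = n - a ^ 3) ↔
      ∃ b, a ≤ b ∧ b ≤ r ∧ a ^ 3 + b ^ 3 = n) := by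
  have ha3 : a ^ 3 ≤ n := le_trans (pv_cube_le_cube har) hr.1
  have hroot := integer_cuberoot_spec (n - a ^ 3) (by omega)
  constructor
  · rintro ⟨h1, h2⟩
    refine ⟨integer_cuberoot (n - a ^ 3), h1, ?_, by omega⟩
    have hlt : (integer_cuberoot (n - a ^ 3)) ^ 3 < (r + 1) ^ 3 := by
      have hd : 0 ≤ a ^ 3 := pow_nonneg ha 3
      have := hr.2
      omega
    have := pv_cube_lt_iff.mp hlt
    omega
  · rintro ⟨b, hb1, hb2, hb3⟩
    have hb : pvIsRoot (n - a ^ 3) b :=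
      ⟨by omega, by have := pv_cube_lt_cube (show b < b + 1 by omega); omega⟩
    have heq : integer_cuberoot (n - a ^ 3) = b := pvIsRoot_unique hroot hb
    rw [heq]
    exact ⟨hb1, by omega⟩

-- pairs (a,b) with a³ + b³ = n are in bijection (via fst) with the a's A's test accepts
theorem pv_card_filter_eq_S (n r : Int) (hr : pvIsRoot n r) :
    ((Finset.Icc 0 r).filter (fun a =>
        a ≤ integer_cuberoot (n - a ^ 3) ∧ (integer_cuberoot (n - a ^ 3)) ^ 3 = n - a ^ 3)).card
      = pvS n 0 r := by
  unfold pvS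
  refine (Finset.card_bij (fun (p : Int × Int) _ => p.1) ?_ ?_ ?_).symm
  · rintro ⟨a, b⟩ hp
    simp only [Finset.mem_filter, Finset.mem_product, Finset.mem_Icc] at hp ⊢
    obtain ⟨⟨⟨h1, h2⟩, h3, h4⟩, h5, h6⟩ := hp
    exact ⟨⟨h1, h2⟩, (pvA_test n a r h1 h2 hr).mpr ⟨b, h5, h4, h6⟩⟩
  · rintro ⟨a1, b1⟩ hp1 ⟨a2, b2⟩ hp2 heq
    simp only [Finset.mem_filter, Finset.mem_product, Finset.mem_Icc] at hp1 hp2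
    simp only at heq
    subst heq
    have : b1 = b2 := pv_cube_inj (by omega)
    simp [this]
  · intro a ha
    simp only [Finset.mem_filter, Finset.mem_Icc] at ha
    obtain ⟨⟨h1, h2⟩, hq⟩ := ha
    obtain ⟨b, hb1, hb2, hb3⟩ := (pvA_test n a r h1 h2 hr).mp hq
    refine ⟨(a, b), ?_, rfl⟩
    simp only [Finset.mem_filter, Finset.mem_product, Finset.mem_Icc]
    exact ⟨⟨⟨h1, h2⟩, by omega, hb2⟩, hb1, hb3⟩

theorem pv_countP_toFinset (p : Int → Bool) : ∀ l : List Int, l.Nodup →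
    l.countP p = (l.toFinset.filter (fun x => p x = true)).card := by
  intro l
  induction l with
  | nil => intro _; simp
  | cons x xs ih =>
    intro hnd
    rw [List.nodup_cons] at hnd
    rw [List.countP_cons, List.toFinset_cons, Finset.filter_insert]
    by_cases hp : p x = true
    · have hnotmem : x ∉ xs.toFinset.filter (fun y => p y = true) := by
        simp only [Finset.mem_filter, List.mem_toFinset]
        exact fun h => hnd.1 h.1
      simp only [if_pos hp, Finset.card_insert_of_notMem hnotmem, ih hnd.2]
    · simp only [if_neg hp, ih hnd.2]
      omega

theorem pv_foldl_count (p : Int → Prop) [DecidablePred p] :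
    ∀ (l : List Int) (c : Int),
      l.foldl (fun c a => if p a then c + 1 else c) c
        = c + (l.countP (fun a => decide (p a)) : Int) := by
  intro l
  induction l with
  | nil => intro c; simp
  | cons x xs ih =>
    intro c
    by_cases hx : p x
    · simp only [List.foldl_cons, List.countP_cons, hx, if_pos, decide_true]
      rw [ih]
      push_cast
      ring
    · simp only [List.foldl_cons, List.countP_cons, hx, if_false, decide_false]
      rw [ih]
      push_cast
      ring

theorem pvA_eq_S (n : Int) (hn : 0 ≤ n) : pair_cube_count n = pvS n 0 (integer_cuberoot n) := by
  have hr := integer_cuberoot_spec n hn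
  have hr0 : 0 ≤ integer_cuberoot n := by
    by_contra h
    have h2 := pv_cube_le_cube (show integer_cuberoot n + 1 ≤ 0 by omega)
    have h3 : (0 : Int) ^ 3 = 0 := by norm_num
    have h4 := hr.2
    omega
  unfold pair_cube_count
  rw [if_neg (by omega)]
  show (PySem.List.pyRange 0 (integer_cuberoot n + 1) 1).foldl
      (fun count a =>
        if a ≤ integer_cuberoot (n - a ^ 3) ∧ (integer_cuberoot (n - a ^ 3)) ^ 3 = n - a ^ 3
        then count + 1 else count) 0
      = (pvS n 0 (integer_cuberoot n) : Int)
  rw [pv_foldl_count, pv_countP_toFinset _ _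
    (PySem.List.nodup_pyRange_one 0 (integer_cuberoot n + 1))]
  have hset : (PySem.List.pyRange 0 (integer_cuberoot n + 1) 1).toFinset
      = Finset.Icc 0 (integer_cuberoot n) := by
    ext x
    simp [PySem.List.mem_pyRange_one]
  have hfc : ((Finset.Icc 0 (integer_cuberoot n)).filter (fun x =>
        (decide (x ≤ integer_cuberoot (n - x ^ 3) ∧
          (integer_cuberoot (n - x ^ 3)) ^ 3 = n - x ^ 3)) = true))
      = ((Finset.Icc 0 (integer_cuberoot n)).filter (fun x =>
        x ≤ integer_cuberoot (n - x ^ 3) ∧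
          (integer_cuberoot (n - x ^ 3)) ^ 3 = n - x ^ 3)) := by
    apply Finset.filter_congr
    intro x _
    simp
  rw [hset, hfc, pv_card_filter_eq_S n _ hr]
  norm_num

theorem pair_cube_main (n : Int) : pair_cube_count n = pair_cube_count_alt n := by
  by_cases hn : n < 0
  · simp [pair_cube_count, pair_cube_count_alt, hn]
  · have hn' : 0 ≤ n := by omega
    rw [pvA_eq_S n hn']
    unfold pair_cube_count_alt
    rw [if_neg (by omega), pvTP_eq, roots_agree n hn']
    simp

-- ===== VERDICT (by name: the statement is the Claim_ definition above) =====
theorem pair_cube_count_spec : Claim_equal_pair_cube_count := by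
  intro n _
  unfold Spec_pair_cube_count
  exact pair_cube_main n
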